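-- pv_equiv track=rewrite | github.com/aristosgi/ALGO_ASSIGNMENTS | assignment-2022-2/hirschberg.py | UpdateAlignments
-- ===== SOURCE A (Python) =====
-- def remove_extra(list1, list2):
--     ii = []
--     for i in range(1, len(list1)):
--         if(list1[i] == list1[i-1] and list2[i] == list2[i-1]):
--             ii.append(i)
--     c = 0
--     for i in ii:
--         list1.pop(i - c)
--         list2.pop(i - c)
--         c = c + 1
--
--     return list1, list2
--
-- def UpdateAlignments(WW, ZZ, WWl, WWr, ZZl, ZZr):
--     if(len(WWl) == 1 and len(WWr) == 1):
--         WW_ = WWl+WWr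
--         ZZ_ = ZZl+ZZr
--         WW.append(''.join(WW_[0:]))
--         ZZ.append(''.join(ZZ_[0:]))
--     else:
--         for l in range(len(WWl)):
--             for r in range(len(WWr)):
--                 templ = []
--                 tempr = []
--                 templ.append(WWl[l])
--                 tempr.append(WWr[r])
--                 temp = (templ + tempr)
--                 WW.append(''.join(temp[0:]))
--                 templ = []
--                 tempr = []
--                 templ.append(ZZl[l])
--                 tempr.append(ZZr[r])
--                 temp = (templ + tempr)
--                 temp = (templ + tempr)
--                 ZZ.append(''.join(temp[0:]))
--     WW, ZZ = remove_extra(WW, ZZ)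
--
--     return WW, ZZ, [], [], [], []
-- ===== SOURCE B (Python) =====
-- def UpdateAlignments(WW, ZZ, WWl, WWr, ZZl, ZZr):
--     # One fused pass: build the cross-product pairs, then dedup consecutive
--     # duplicates (including the pre-existing WW/ZZ prefix) while writing out.
--     new = [(wl + wr, zl + zr) for wl, zl in zip(WWl, ZZl) for wr, zr in zip(WWr, ZZr)]
--     out = []
--     for pair in list(zip(WW, ZZ)) + new:
--         if not out or out[-1] != pair:
--             out.append(pair)
--     WW[:] = [w for w, _ in out]
--     ZZ[:] = [z for _, z in out]
--     return WW, ZZ, [], [], [], []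
-- ===== Notes on version B (the rewrite author's own statement) =====
-- stated objective: faster
-- what changed: Replaces the append-everything-then-scan-indices-then-pop remove_extra phase (and the special singleton branch) with one fused pass: build the cross-product pairs by zipping the parallel W/Z lists and append each pair only when it differs from the last kept pair, seeding from the existing WW/ZZ prefix.
import Mathlib
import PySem

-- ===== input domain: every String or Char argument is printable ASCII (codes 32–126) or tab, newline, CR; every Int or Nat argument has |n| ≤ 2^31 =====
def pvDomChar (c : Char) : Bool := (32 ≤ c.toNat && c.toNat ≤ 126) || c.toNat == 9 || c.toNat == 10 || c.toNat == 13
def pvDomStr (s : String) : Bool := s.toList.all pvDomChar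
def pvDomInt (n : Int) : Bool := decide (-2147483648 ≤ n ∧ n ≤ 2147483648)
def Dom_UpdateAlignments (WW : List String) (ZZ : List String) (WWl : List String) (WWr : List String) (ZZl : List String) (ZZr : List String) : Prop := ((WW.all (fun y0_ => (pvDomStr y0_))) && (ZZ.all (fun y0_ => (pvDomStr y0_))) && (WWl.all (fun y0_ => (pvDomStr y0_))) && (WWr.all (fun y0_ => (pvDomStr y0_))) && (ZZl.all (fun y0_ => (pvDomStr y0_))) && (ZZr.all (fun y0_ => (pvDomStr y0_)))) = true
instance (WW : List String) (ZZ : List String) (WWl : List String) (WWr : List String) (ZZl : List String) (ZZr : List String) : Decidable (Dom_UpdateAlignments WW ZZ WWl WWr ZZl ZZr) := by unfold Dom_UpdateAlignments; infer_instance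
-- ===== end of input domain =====

-- B fuses generation and dedup into one linear pass over zipped pairs, avoiding
-- remove_extra's collect-indices-then-pop scan (each pop shifts the tail: quadratic).
-- A mutates WW/ZZ in place (append/pop) and B mutates them by slice assignment; the
-- final contents coincide, and the equivalence proved here is about the return value.

-- ===== PORT A =====
-- port of remove_extra: collect indices ii, then pop them from both lists with a shifting offset
def pvRemoveExtra (l1 : List String) (l2 : List String) : List String × List String :=
  let ii : List Int :=
    (PySem.List.pyRange 1 (l1.length : Int) 1).foldl
      (fun acc i =>
        if PySem.List.pyGetD l1 i "" = PySem.List.pyGetD l1 (i - 1) "" ∧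
           PySem.List.pyGetD l2 i "" = PySem.List.pyGetD l2 (i - 1) "" then acc ++ [i] else acc) []
  let s :=
    ii.foldl
      (fun (s : List String × List String × Int) i =>
        (((PySem.List.pop? s.1 (i - s.2.2)).map Prod.snd).getD s.1,
         ((PySem.List.pop? s.2.1 (i - s.2.2)).map Prod.snd).getD s.2.1,
         s.2.2 + 1))
      (l1, l2, 0)
  (s.1, s.2.1)

def UpdateAlignments (WW : List String) (ZZ : List String) (WWl : List String) (WWr : List String) (ZZl : List String) (ZZr : List String) : List String × List String × List String × List String × List String × List String :=
  let p : List String × List String :=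
    if WWl.length = 1 ∧ WWr.length = 1 then
      (WW ++ [PySem.Str.join "" (PySem.List.slice (WWl ++ WWr) (some 0) none)],
       ZZ ++ [PySem.Str.join "" (PySem.List.slice (ZZl ++ ZZr) (some 0) none)])
    else
      (PySem.List.pyRange 0 (WWl.length : Int) 1).foldl
        (fun pp l =>
          (PySem.List.pyRange 0 (WWr.length : Int) 1).foldl
            (fun (q : List String × List String) r =>
              (q.1 ++ [PySem.Str.join "" (PySem.List.slice ([PySem.List.pyGetD WWl l ""] ++ [PySem.List.pyGetD WWr r ""]) (some 0) none)],
               q.2 ++ [PySem.Str.join "" (PySem.List.slice ([PySem.List.pyGetD ZZl l ""] ++ [PySem.List.pyGetD ZZr r ""]) (some 0) none)]))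
            pp)
        (WW, ZZ)
  let q := pvRemoveExtra p.1 p.2
  (q.1, q.2, [], [], [], [])

-- ===== PORT B =====
-- wl + wr on strings, computed PySem-exactly
def pvCat (a : String) (b : String) : String := PySem.Str.join "" [a, b]

-- 'if not out or out[-1] != pair: out.append(pair)'
def pvDedupStep (out : List (String × String)) (p : String × String) : List (String × String) :=
  if out = [] ∨ out.getLast? ≠ some p then out ++ [p] else out

def UpdateAlignments_alt (WW : List String) (ZZ : List String) (WWl : List String) (WWr : List String) (ZZl : List String) (ZZr : List String) : List String × List String × List String × List String × List String × List String :=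
  let news : List (String × String) :=
    (WWl.zip ZZl).flatMap (fun wz => (WWr.zip ZZr).map (fun wz' => (pvCat wz.1 wz'.1, pvCat wz.2 wz'.2)))
  let out := ((WW.zip ZZ) ++ news).foldl pvDedupStep []
  (out.map Prod.fst, out.map Prod.snd, [], [], [], [])

-- ===== PRECONDITION & SPEC =====
-- Pre_ restricts to the function's natural domain of PARALLEL alignment lists (equal lengths
-- of each W/Z pair, as every caller in hirschberg.py passes). Outside it A either raises an
-- IndexError (a Z-side list shorter than its W-side) or returns values that depend on the
-- accident of which side is longer (extra ZZl/ZZr entries joined into one string or silently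
-- ignored, a trailing un-deduplicated ZZ tail); B does the natural zip-truncating thing there.
def Pre_UpdateAlignments (WW : List String) (ZZ : List String) (WWl : List String) (WWr : List String) (ZZl : List String) (ZZr : List String) : Prop :=
  ZZ.length = WW.length ∧ ZZl.length = WWl.length ∧ ZZr.length = WWr.length
instance (WW : List String) (ZZ : List String) (WWl : List String) (WWr : List String) (ZZl : List String) (ZZr : List String) : Decidable (Pre_UpdateAlignments WW ZZ WWl WWr ZZl ZZr) := by unfold Pre_UpdateAlignments; infer_instance

def pvWitness_UpdateAlignments : List String × List String × List String × List String × List String × List String :=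
  (["ab"], ["xy"], ["a", "b"], ["c"], ["x", "y"], ["z"])

def Spec_UpdateAlignments (WW : List String) (ZZ : List String) (WWl : List String) (WWr : List String) (ZZl : List String) (ZZr : List String) (out : List String × List String × List String × List String × List String × List String) : Prop := out = UpdateAlignments_alt WW ZZ WWl WWr ZZl ZZr
instance (WW : List String) (ZZ : List String) (WWl : List String) (WWr : List String) (ZZl : List String) (ZZr : List String) (out : List String × List String × List String × List String × List String × List String) : Decidable (Spec_UpdateAlignments WW ZZ WWl WWr ZZl ZZr out) := by unfold Spec_UpdateAlignments; infer_instance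

-- ===== CLAIM (what is proved, stated in full; the proofs are below) =====
def Claim_equal_UpdateAlignments : Prop := ∀ (WW : List String) (ZZ : List String) (WWl : List String) (WWr : List String) (ZZl : List String) (ZZr : List String), Dom_UpdateAlignments WW ZZ WWl WWr ZZl ZZr → Pre_UpdateAlignments WW ZZ WWl WWr ZZl ZZr → Spec_UpdateAlignments WW ZZ WWl WWr ZZl ZZr (UpdateAlignments WW ZZ WWl WWr ZZl ZZr)

-- ===== LEMMAS AND PROOFS =====

-- destutter against the last kept pair
def pvDGo : (String × String) → List (String × String) → List (String × String)
  | _, [] => []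
  | prev, x :: xs => if x = prev then pvDGo prev xs else x :: pvDGo x xs

def pvDD : List (String × String) → List (String × String)
  | [] => []
  | a :: t => a :: pvDGo a t

-- the duplicate-index list remove_extra collects, recursively
def pvJsp : List (String × String) → List Int
  | [] => []
  | [_] => []
  | a :: x :: t => (if x = a then [1] else []) ++ (pvJsp (x :: t)).map (· + 1)

-- the pop loop of remove_extra, on the zipped list
def pvPairFold : List (String × String) → List Int → Int → List (String × String)
  | q, [], _ => q
  | q, i :: J, c => pvPairFold (((PySem.List.pop? q (i - c)).map Prod.snd).getD q) J (c + 1)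

theorem pvDedup_foldl (t : List (String × String)) :
    ∀ (acc : List (String × String)) (h : acc ≠ []),
      t.foldl pvDedupStep acc = acc ++ pvDGo (acc.getLast h) t := by
  induction t with
  | nil => intro acc h; simp [pvDGo]
  | cons p t ih =>
    intro acc h
    by_cases hp : p = acc.getLast h
    · have h1 : pvDedupStep acc p = acc := by
        unfold pvDedupStep
        rw [if_neg]
        push Not
        exact ⟨h, by rw [List.getLast?_eq_getLast_of_ne_nil h, hp]⟩
      rw [List.foldl_cons, h1]
      have h2 : pvDGo (acc.getLast h) (p :: t) = pvDGo (acc.getLast h) t := by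
        rw [pvDGo, if_pos hp]
      rw [h2]
      exact ih acc h
    · have h1 : pvDedupStep acc p = acc ++ [p] := by
        unfold pvDedupStep
        rw [if_pos]
        right
        rw [List.getLast?_eq_getLast_of_ne_nil h]
        intro hcon
        exact hp (Option.some_injective _ hcon).symm
      rw [List.foldl_cons, h1, ih (acc ++ [p]) (by simp)]
      have h2 : (acc ++ [p]).getLast (by simp) = p := by
        simp
      rw [h2]
      have h3 : pvDGo (acc.getLast h) (p :: t) = p :: pvDGo p t := by
        rw [pvDGo, if_neg hp]
      rw [h3]
      simp

theorem pvDedup_eq_pvDD (q : List (String × String)) :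
    q.foldl pvDedupStep [] = pvDD q := by
  cases q with
  | nil => rfl
  | cons a t =>
    have : pvDedupStep [] a = [a] := by simp [pvDedupStep]
    simp only [List.foldl_cons, this, pvDD]
    rw [pvDedup_foldl t [a] (by simp)]
    simp

theorem pvPairFold_shift (J : List Int) : ∀ (q : List (String × String)) (c : Int),
    pvPairFold q (J.map (· + 1)) (c + 1) = pvPairFold q J c := by
  induction J with
  | nil => intro q c; rfl
  | cons i J ih =>
    intro q c
    simp only [List.map_cons, pvPairFold]
    have : i + 1 - (c + 1) = i - c := by ring
    rw [this, ih]

theorem pvPop_none {α : Type} (xs : List α) (k : Nat) (h : xs.length ≤ k) :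
    PySem.List.pop? xs (k : Int) = none := by
  simp [PySem.List.pop?, PySem.List.pyIdx?]
  omega

theorem pvPop_cons (a : String × String) (q : List (String × String)) (j : Int) (hj : 1 ≤ j) :
    ((PySem.List.pop? (a :: q) j).map Prod.snd).getD (a :: q) =
      a :: ((PySem.List.pop? q (j - 1)).map Prod.snd).getD q := by
  obtain ⟨k, rfl⟩ : ∃ k : Nat, j = (k : Int) + 1 := ⟨(j - 1).toNat, by omega⟩
  have hcast : ((k : Int) + 1) = (((k + 1 : Nat)) : Int) := by push_cast; ring
  have hsub : (((k + 1 : Nat)) : Int) - 1 = (k : Int) := by push_cast; ring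
  by_cases hk : k < q.length
  · rw [hcast, PySem.List.pop?_natCast _ _ (by simpa using Nat.succ_lt_succ hk),
        hsub, PySem.List.pop?_natCast _ _ hk]
    simp
  · rw [hcast, pvPop_none _ _ (by simp; omega), hsub, pvPop_none _ _ (by omega)]
    simp

theorem pvPairFold_head (J : List Int) : ∀ (q : List (String × String)) (a : String × String) (c : Int),
    J.Pairwise (· < ·) → (∀ j ∈ J, c + 1 ≤ j) →
    pvPairFold (a :: q) J c = a :: pvPairFold q (J.map (· - 1)) c := by
  induction J with
  | nil => intro q a c _ _; rfl
  | cons i J ih =>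
    intro q a c hpw hlb
    simp only [pvPairFold, List.map_cons]
    have hi : c + 1 ≤ i := hlb i (by simp)
    rw [pvPop_cons a q (i - c) (by omega)]
    have harith : i - c - 1 = i - 1 - c := by ring
    rw [harith]
    exact ih _ a (c + 1) hpw.of_cons (fun j hj => by
      have h1 := (List.pairwise_cons.mp hpw).1 j hj
      omega)

theorem pvJsp_lb : ∀ (q : List (String × String)), ∀ j ∈ pvJsp q, 1 ≤ j := by
  intro q
  induction q with
  | nil => simp [pvJsp]
  | cons a t ih =>
    cases t with
    | nil => simp [pvJsp]
    | cons x t' =>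
      simp only [pvJsp, List.mem_append, List.mem_map]
      rintro j (hj | ⟨j', hj', rfl⟩)
      · split at hj <;> simp_all
      · have := ih j' hj'; omega

theorem pvJsp_pairwise : ∀ (q : List (String × String)), (pvJsp q).Pairwise (· < ·) := by
  intro q
  induction q with
  | nil => simp [pvJsp]
  | cons a t ih =>
    cases t with
    | nil => simp [pvJsp]
    | cons x t' =>
      simp only [pvJsp]
      rw [List.pairwise_append]
      refine ⟨by split <;> simp, (List.pairwise_map).mpr (ih.imp (fun h => by omega)), ?_⟩
      intro j hj j' hj'
      have h1 : j = 1 := by split at hj <;> simp_all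
      obtain ⟨j'', hj'', rfl⟩ := List.mem_map.mp hj'
      have := pvJsp_lb _ j'' hj''
      omega

theorem pvM : ∀ (t : List (String × String)) (a : String × String),
    pvPairFold (a :: t) (pvJsp (a :: t)) 0 = a :: pvDGo a t := by
  intro t
  induction t with
  | nil => intro a; rfl
  | cons x t' ih =>
    intro a
    by_cases hx : x = a
    · subst hx
      have hJ : pvJsp (x :: x :: t') = 1 :: (pvJsp (x :: t')).map (· + 1) := by
        simp [pvJsp]
      rw [hJ]
      simp only [pvPairFold]
      have h1 : (1 : Int) - 0 = ((1 : Nat) : Int) := by norm_num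
      rw [h1, PySem.List.pop?_natCast (x :: x :: t') 1 (by simp)]
      simp only [Option.map_some, Option.getD_some, List.eraseIdx_cons_succ, List.eraseIdx_cons_zero]
      have h2 : (0 : Int) + 1 = 1 := by norm_num
      rw [pvPairFold_shift ((pvJsp (x :: t'))) (x :: t') 0, ih x]
      simp [pvDGo]
    · have hJ : pvJsp (a :: x :: t') = (pvJsp (x :: t')).map (· + 1) := by
        simp [pvJsp, hx]
      rw [hJ]
      rw [pvPairFold_head _ _ _ _ ((List.pairwise_map).mpr ((pvJsp_pairwise _).imp (fun h => by omega)))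
            (fun j hj => by obtain ⟨j', hj', rfl⟩ := List.mem_map.mp hj; have := pvJsp_lb _ j' hj'; omega)]
      have hmm : ((pvJsp (x :: t')).map (· + 1)).map (· - 1) = pvJsp (x :: t') := by
        rw [List.map_map]
        have hid : ((fun x => x - 1) ∘ fun x : Int => x + 1) = id := by funext y; simp
        rw [hid, List.map_id]
      rw [hmm, ih x]
      simp [pvDGo, hx]

theorem pvPairFold_Jsp (q : List (String × String)) :
    pvPairFold q (pvJsp q) 0 = pvDD q := by
  cases q with
  | nil => rfl
  | cons a t => rw [pvM t a]; rfl

theorem pvZipErase {α β : Type} : ∀ (l1 : List α) (l2 : List β) (k : Nat), l2.length = l1.length →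
    (l1.eraseIdx k).zip (l2.eraseIdx k) = (l1.zip l2).eraseIdx k := by
  intro l1
  induction l1 with
  | nil => intro l2 k h; simp at h; simp [h]
  | cons a t ih =>
    intro l2 k h
    cases l2 with
    | nil => simp at h
    | cons b s =>
      cases k with
      | zero => simp
      | succ k' =>
        simp only [List.eraseIdx_cons_succ, List.zip_cons_cons]
        rw [ih s k' (by simpa using h)]

theorem pvPyIdx_lt (n : Nat) (i : Int) (k : Nat) (h : PySem.List.pyIdx? n i = some k) : k < n := by
  simp [PySem.List.pyIdx?] at h
  split at h <;> split at h <;> simp_all <;> omega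

theorem pvFold2 : ∀ (J : List Int) (l1 l2 : List String) (c : Int), l2.length = l1.length →
    (J.foldl (fun (s : List String × List String × Int) i =>
        (((PySem.List.pop? s.1 (i - s.2.2)).map Prod.snd).getD s.1,
         ((PySem.List.pop? s.2.1 (i - s.2.2)).map Prod.snd).getD s.2.1,
         s.2.2 + 1)) (l1, l2, c)) =
      ((pvPairFold (l1.zip l2) J c).map Prod.fst, (pvPairFold (l1.zip l2) J c).map Prod.snd, c + J.length) := by
  intro J
  induction J with
  | nil =>
    intro l1 l2 c h
    simp [pvPairFold, List.map_fst_zip h.ge, List.map_snd_zip h.le]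
  | cons i J ih =>
    intro l1 l2 c h
    have hzlen : (l1.zip l2).length = l1.length := by simp [h]
    simp only [List.foldl_cons, pvPairFold]
    cases hidx : PySem.List.pyIdx? l1.length (i - c) with
    | none =>
      have e1 : PySem.List.pop? l1 (i - c) = none := by
        simp [PySem.List.pop?, hidx]
      have e2 : PySem.List.pop? l2 (i - c) = none := by
        simp [PySem.List.pop?, h, hidx]
      have e3 : PySem.List.pop? (l1.zip l2) (i - c) = none := by
        simp [PySem.List.pop?, hzlen, hidx]
      rw [e1, e2, e3]
      simpa [add_assoc, add_comm, add_left_comm] using ih l1 l2 (c + 1) h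
    | some k =>
      have hk : k < l1.length := pvPyIdx_lt _ _ _ hidx
      have e1 : PySem.List.pop? l1 (i - c) = some (l1[k], l1.eraseIdx k) := by
        simp [PySem.List.pop?, hidx, List.getElem?_eq_getElem hk]
      have e2 : PySem.List.pop? l2 (i - c) = some (l2[k]'(by omega), l2.eraseIdx k) := by
        simp [PySem.List.pop?, h, hidx, List.getElem?_eq_getElem (show k < l2.length by omega)]
      have e3 : PySem.List.pop? (l1.zip l2) (i - c) =
          some ((l1.zip l2)[k]'(by omega), (l1.zip l2).eraseIdx k) := by
        simp [PySem.List.pop?, hzlen, hidx, List.getElem?_eq_getElem (show k < (l1.zip l2).length by omega)]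
      rw [e1, e2, e3]
      simp only [Option.map_some, Option.getD_some]
      rw [← pvZipErase l1 l2 k h]
      have hlen' : (l2.eraseIdx k).length = (l1.eraseIdx k).length := by
        rw [List.length_eraseIdx_of_lt (show k < l2.length by omega),
            List.length_eraseIdx_of_lt hk, h]
      simpa [add_assoc, add_comm, add_left_comm] using ih (l1.eraseIdx k) (l2.eraseIdx k) (c + 1) hlen'

theorem pvGetD_cons {α : Type} (a : α) (r : List α) (j : Int) (d : α) (hj : 0 ≤ j) :
    PySem.List.pyGetD (a :: r) (j + 1) d = PySem.List.pyGetD r j d := by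
  by_cases hlt : j < (r.length : Int)
  · rw [@PySem.List.pyGetD_eq_getElem α (a :: r) (j + 1) d (by omega) (by simp; omega),
        @PySem.List.pyGetD_eq_getElem α r j d hj (by simpa using hlt)]
    have : (j + 1).toNat = j.toNat + 1 := by omega
    simp [this]
  · rw [PySem.List.pyGetD_of_none _ _ _ ((PySem.List.pyGet?_eq_none_iff _ _).mpr
          (by simp only [PySem.Raise.InRange, not_and]; intro _; simp; omega)),
        PySem.List.pyGetD_of_none _ _ _ ((PySem.List.pyGet?_eq_none_iff _ _).mpr
          (by simp only [PySem.Raise.InRange, not_and]; intro _; omega))]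

theorem pvRange_shift (n : Int) :
    PySem.List.pyRange 2 (n + 2) 1 = (PySem.List.pyRange 1 (n + 1) 1).map (· + 1) := by
  rw [PySem.List.pyRange_one, PySem.List.pyRange_one]
  have : (n + 2 - 2).toNat = (n + 1 - 1).toNat := by omega
  rw [this, List.map_map]
  apply List.map_congr_left
  intro k _
  simp
  ring

theorem pvFilt (junk : String × String) : ∀ (q : List (String × String)),
    (PySem.List.pyRange 1 (q.length : Int) 1).filter
      (fun i => decide (PySem.List.pyGetD q i junk = PySem.List.pyGetD q (i - 1) junk)) = pvJsp q := by
  intro q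
  induction q with
  | nil => simp [pvJsp, PySem.List.pyRange_one_eq_nil]
  | cons a t ih =>
    cases t with
    | nil => simp [pvJsp, PySem.List.pyRange_one_eq_nil]
    | cons x t' =>
      have hlen : ((a :: x :: t').length : Int) = (t'.length : Int) + 2 := by simp; ring
      rw [hlen, PySem.List.pyRange_one_cons (by omega)]
      rw [show (1 : Int) + 1 = 2 by norm_num, pvRange_shift]
      rw [List.filter_cons, List.filter_map]
      have hhead : (decide (PySem.List.pyGetD (a :: x :: t') 1 junk = PySem.List.pyGetD (a :: x :: t') (1 - 1) junk)) = decide (x = a) := by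
        have e1 : PySem.List.pyGetD (a :: x :: t') 1 junk = x := by
          rw [show (1 : Int) = (0 : Int) + 1 by ring, pvGetD_cons _ _ _ _ le_rfl]
          simp [PySem.List.pyGetD_zero_cons]
        have e2 : PySem.List.pyGetD (a :: x :: t') (1 - 1) junk = a := by
          norm_num [PySem.List.pyGetD_zero_cons]
        rw [e1, e2]
      have htail : (PySem.List.pyRange 1 ((t'.length : Int) + 1) 1).filter
            ((fun i => decide (PySem.List.pyGetD (a :: x :: t') i junk = PySem.List.pyGetD (a :: x :: t') (i - 1) junk)) ∘ (· + 1))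
          = pvJsp (x :: t') := by
        rw [← ih]
        have hl2 : ((x :: t').length : Int) = (t'.length : Int) + 1 := by simp
        rw [hl2]
        apply List.filter_congr
        intro i hi
        have hmem := (PySem.List.mem_pyRange_one).mp hi
        have e1 : PySem.List.pyGetD (a :: x :: t') (i + 1) junk = PySem.List.pyGetD (x :: t') i junk :=
          pvGetD_cons _ _ _ _ (by omega)
        have e2 : PySem.List.pyGetD (a :: x :: t') (i + 1 - 1) junk = PySem.List.pyGetD (x :: t') (i - 1) junk := by
          have : i + 1 - 1 = (i - 1) + 1 := by ring
          rw [this, pvGetD_cons _ _ _ _ (by omega)]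
        simp only [Function.comp_apply, e1, e2]
      rw [htail]
      simp only [pvJsp, hhead]
      by_cases hxa : x = a <;> simp [hxa]

theorem pvRemoveExtra_eq (l1 l2 : List String) (h : l2.length = l1.length) :
    pvRemoveExtra l1 l2 = ((pvDD (l1.zip l2)).map Prod.fst, (pvDD (l1.zip l2)).map Prod.snd) := by
  unfold pvRemoveExtra
  have hii : (PySem.List.pyRange 1 (l1.length : Int) 1).foldl
      (fun acc i =>
        if PySem.List.pyGetD l1 i "" = PySem.List.pyGetD l1 (i - 1) "" ∧
           PySem.List.pyGetD l2 i "" = PySem.List.pyGetD l2 (i - 1) "" then acc ++ [i] else acc) []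
      = pvJsp (l1.zip l2) := by
    rw [PySem.List.foldl_append_ite_eq_filter]
    have hzl : ((l1.zip l2).length : Int) = (l1.length : Int) := by simp [h]
    rw [← pvFilt ("", "") (l1.zip l2), hzl]
    apply List.filter_congr
    intro i hi
    have hmem := (PySem.List.mem_pyRange_one).mp hi
    have hi1 : i.toNat < l1.length := by omega
    have hi0 : (i - 1).toNat < l1.length := by omega
    have hz : (l1.zip l2).length = l1.length := by simp [h]
    rw [@PySem.List.pyGetD_eq_getElem _ l1 i "" (by omega) (by omega),
        @PySem.List.pyGetD_eq_getElem _ l1 (i - 1) "" (by omega) (by omega),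
        @PySem.List.pyGetD_eq_getElem _ l2 i "" (by omega) (by omega),
        @PySem.List.pyGetD_eq_getElem _ l2 (i - 1) "" (by omega) (by omega),
        @PySem.List.pyGetD_eq_getElem _ (l1.zip l2) i ("", "") (by omega) (by simp [hz]; omega),
        @PySem.List.pyGetD_eq_getElem _ (l1.zip l2) (i - 1) ("", "") (by omega) (by simp [hz]; omega)]
    simp [List.getElem_zip, Prod.ext_iff]
  rw [hii]
  simp only [pvFold2 _ l1 l2 0 h, pvPairFold_Jsp]

theorem pvGenPair (L : List Int) (f g : Int → String) : ∀ (p : List String × List String),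
    L.foldl (fun (q : List String × List String) r => (q.1 ++ [f r], q.2 ++ [g r])) p
      = (p.1 ++ L.map f, p.2 ++ L.map g) := by
  induction L with
  | nil => intro p; simp
  | cons r L ih => intro p; simp [ih]

theorem pvGenPair2 (L : List Int) (F G : Int → List String) : ∀ (p : List String × List String),
    L.foldl (fun (q : List String × List String) l => (q.1 ++ F l, q.2 ++ G l)) p
      = (p.1 ++ L.flatMap F, p.2 ++ L.flatMap G) := by
  induction L with
  | nil => intro p; simp
  | cons l L ih => intro p; simp [ih]

theorem pvMapZip {β : Type} (xs ys : List String) (h : ys.length = xs.length)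
    (F : String → String → β) :
    (PySem.List.pyRange 0 (xs.length : Int) 1).map
        (fun j => F (PySem.List.pyGetD xs j "") (PySem.List.pyGetD ys j ""))
      = (xs.zip ys).map (fun p => F p.1 p.2) := by
  rw [PySem.List.pyRange_one, List.map_map]
  apply List.ext_getElem
  · simp [h]
  · intro k hk1 hk2
    simp only [List.getElem_map, List.getElem_range, Function.comp_apply]
    have hkx : k < xs.length := by simp at hk1; omega
    rw [@PySem.List.pyGetD_eq_getElem _ xs (0 + (k : Int)) "" (by omega) (by omega),
        @PySem.List.pyGetD_eq_getElem _ ys (0 + (k : Int)) "" (by omega) (by omega)]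
    simp [List.getElem_zip]

def pvNews (WWl WWr ZZl ZZr : List String) : List (String × String) :=
  (WWl.zip ZZl).flatMap (fun wz => (WWr.zip ZZr).map (fun wz' => (pvCat wz.1 wz'.1, pvCat wz.2 wz'.2)))

theorem pvJoin2 (x y : String) :
    PySem.Str.join "" (PySem.List.slice ([x] ++ [y]) (some 0) none) = pvCat x y := by
  simp [PySem.List.slice_zero_start, PySem.List.slice_none_none, pvCat]

theorem pvPhase1 (WW ZZ WWl WWr ZZl ZZr : List String)
    (h1 : ZZl.length = WWl.length) (h2 : ZZr.length = WWr.length) :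
    (PySem.List.pyRange 0 (WWl.length : Int) 1).foldl
      (fun pp l => (PySem.List.pyRange 0 (WWr.length : Int) 1).foldl
        (fun (q : List String × List String) r =>
          (q.1 ++ [PySem.Str.join "" (PySem.List.slice ([PySem.List.pyGetD WWl l ""] ++ [PySem.List.pyGetD WWr r ""]) (some 0) none)],
           q.2 ++ [PySem.Str.join "" (PySem.List.slice ([PySem.List.pyGetD ZZl l ""] ++ [PySem.List.pyGetD ZZr r ""]) (some 0) none)])) pp)
      (WW, ZZ)
    = (WW ++ (pvNews WWl WWr ZZl ZZr).map Prod.fst, ZZ ++ (pvNews WWl WWr ZZl ZZr).map Prod.snd) := by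
  have hfun : (fun (pp : List String × List String) (l : Int) => (PySem.List.pyRange 0 (WWr.length : Int) 1).foldl
        (fun (q : List String × List String) r =>
          (q.1 ++ [PySem.Str.join "" (PySem.List.slice ([PySem.List.pyGetD WWl l ""] ++ [PySem.List.pyGetD WWr r ""]) (some 0) none)],
           q.2 ++ [PySem.Str.join "" (PySem.List.slice ([PySem.List.pyGetD ZZl l ""] ++ [PySem.List.pyGetD ZZr r ""]) (some 0) none)])) pp)
      = fun (pp : List String × List String) (l : Int) =>
        (pp.1 ++ (PySem.List.pyRange 0 (WWr.length : Int) 1).map (fun r => pvCat (PySem.List.pyGetD WWl l "") (PySem.List.pyGetD WWr r "")),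
         pp.2 ++ (PySem.List.pyRange 0 (WWr.length : Int) 1).map (fun r => pvCat (PySem.List.pyGetD ZZl l "") (PySem.List.pyGetD ZZr r ""))) := by
    funext pp l
    rw [pvGenPair]
    simp only [pvJoin2]
  rw [hfun, pvGenPair2]
  have hinner : ∀ (u : List String), ∀ l : Int,
      (PySem.List.pyRange 0 (WWr.length : Int) 1).map (fun r => pvCat (PySem.List.pyGetD u l "") (PySem.List.pyGetD WWr r "")) =
        (WWr.zip ZZr).map (fun p => pvCat (PySem.List.pyGetD u l "") p.1) := by
    intro u l
    exact pvMapZip WWr ZZr h2 (fun w _ => pvCat (PySem.List.pyGetD u l "") w)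
  have hinner2 : ∀ (u : List String), ∀ l : Int,
      (PySem.List.pyRange 0 (WWr.length : Int) 1).map (fun r => pvCat (PySem.List.pyGetD u l "") (PySem.List.pyGetD ZZr r "")) =
        (WWr.zip ZZr).map (fun p => pvCat (PySem.List.pyGetD u l "") p.2) := by
    intro u l
    exact pvMapZip WWr ZZr h2 (fun _ z => pvCat (PySem.List.pyGetD u l "") z)
  have hfst : (PySem.List.pyRange 0 (WWl.length : Int) 1).flatMap
        (fun l => (PySem.List.pyRange 0 (WWr.length : Int) 1).map (fun r => pvCat (PySem.List.pyGetD WWl l "") (PySem.List.pyGetD WWr r "")))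
      = (pvNews WWl WWr ZZl ZZr).map Prod.fst := by
    simp only [List.flatMap, hinner]
    rw [show (fun l => ((WWr.zip ZZr).map (fun p => pvCat (PySem.List.pyGetD WWl l "") p.1))) =
          (fun l => (fun w _ => (WWr.zip ZZr).map (fun p => pvCat w p.1)) (PySem.List.pyGetD WWl l "") (PySem.List.pyGetD ZZl l "")) from rfl]
    rw [pvMapZip WWl ZZl h1 (fun w _ => (WWr.zip ZZr).map (fun p => pvCat w p.1))]
    simp only [pvNews, List.flatMap, List.map_flatten, List.map_map]
    congr 1
    apply List.map_congr_left
    intro wz _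
    simp
  have hsnd : (PySem.List.pyRange 0 (WWl.length : Int) 1).flatMap
        (fun l => (PySem.List.pyRange 0 (WWr.length : Int) 1).map (fun r => pvCat (PySem.List.pyGetD ZZl l "") (PySem.List.pyGetD ZZr r "")))
      = (pvNews WWl WWr ZZl ZZr).map Prod.snd := by
    simp only [List.flatMap, hinner2]
    rw [show (fun l => ((WWr.zip ZZr).map (fun p => pvCat (PySem.List.pyGetD ZZl l "") p.2))) =
          (fun l => (fun _ z => (WWr.zip ZZr).map (fun p => pvCat z p.2)) (PySem.List.pyGetD WWl l "") (PySem.List.pyGetD ZZl l "")) from rfl]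
    rw [pvMapZip WWl ZZl h1 (fun _ z => (WWr.zip ZZr).map (fun p => pvCat z p.2))]
    simp only [pvNews, List.flatMap, List.map_flatten, List.map_map]
    congr 1
    apply List.map_congr_left
    intro wz _
    simp
  rw [hfst, hsnd]

theorem pvMain (WW ZZ WWl WWr ZZl ZZr : List String)
    (h0 : ZZ.length = WW.length) (h1 : ZZl.length = WWl.length) (h2 : ZZr.length = WWr.length) :
    UpdateAlignments WW ZZ WWl WWr ZZl ZZr = UpdateAlignments_alt WW ZZ WWl WWr ZZl ZZr := by
  have hB : UpdateAlignments_alt WW ZZ WWl WWr ZZl ZZr =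
      ((pvDD ((WW.zip ZZ) ++ pvNews WWl WWr ZZl ZZr)).map Prod.fst,
       (pvDD ((WW.zip ZZ) ++ pvNews WWl WWr ZZl ZZr)).map Prod.snd, [], [], [], []) := by
    show (((((WW.zip ZZ) ++ pvNews WWl WWr ZZl ZZr).foldl pvDedupStep []).map Prod.fst,
           (((WW.zip ZZ) ++ pvNews WWl WWr ZZl ZZr).foldl pvDedupStep []).map Prod.snd,
           [], [], [], []) : List String × List String × List String × List String × List String × List String) = _
    rw [pvDedup_eq_pvDD]
  have hp : (if WWl.length = 1 ∧ WWr.length = 1 then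
      (WW ++ [PySem.Str.join "" (PySem.List.slice (WWl ++ WWr) (some 0) none)],
       ZZ ++ [PySem.Str.join "" (PySem.List.slice (ZZl ++ ZZr) (some 0) none)])
    else
      (PySem.List.pyRange 0 (WWl.length : Int) 1).foldl
        (fun pp l =>
          (PySem.List.pyRange 0 (WWr.length : Int) 1).foldl
            (fun (q : List String × List String) r =>
              (q.1 ++ [PySem.Str.join "" (PySem.List.slice ([PySem.List.pyGetD WWl l ""] ++ [PySem.List.pyGetD WWr r ""]) (some 0) none)],
               q.2 ++ [PySem.Str.join "" (PySem.List.slice ([PySem.List.pyGetD ZZl l ""] ++ [PySem.List.pyGetD ZZr r ""]) (some 0) none)]))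
            pp)
        (WW, ZZ))
      = (WW ++ (pvNews WWl WWr ZZl ZZr).map Prod.fst, ZZ ++ (pvNews WWl WWr ZZl ZZr).map Prod.snd) := by
    by_cases hb : WWl.length = 1 ∧ WWr.length = 1
    · rw [if_pos hb]
      obtain ⟨w1, rfl⟩ := List.length_eq_one_iff.mp hb.1
      obtain ⟨w2, rfl⟩ := List.length_eq_one_iff.mp hb.2
      obtain ⟨z1, rfl⟩ := List.length_eq_one_iff.mp (by simpa using h1)
      obtain ⟨z2, rfl⟩ := List.length_eq_one_iff.mp (by simpa using h2)
      have hnews : pvNews [w1] [w2] [z1] [z2] = [(pvCat w1 w2, pvCat z1 z2)] := by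
        simp [pvNews]
      rw [hnews, pvJoin2 w1 w2, pvJoin2 z1 z2]
      simp
    · rw [if_neg hb]
      exact pvPhase1 WW ZZ WWl WWr ZZl ZZr h1 h2
  have hlen : (ZZ ++ (pvNews WWl WWr ZZl ZZr).map Prod.snd).length
      = (WW ++ (pvNews WWl WWr ZZl ZZr).map Prod.fst).length := by
    simp [h0]
  have hzip : (WW ++ (pvNews WWl WWr ZZl ZZr).map Prod.fst).zip (ZZ ++ (pvNews WWl WWr ZZl ZZr).map Prod.snd)
      = (WW.zip ZZ) ++ pvNews WWl WWr ZZl ZZr := by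
    rw [List.zip_append h0.symm, List.zip_map']
    simp
  unfold UpdateAlignments
  rw [hp]
  show ((pvRemoveExtra (WW ++ (pvNews WWl WWr ZZl ZZr).map Prod.fst) (ZZ ++ (pvNews WWl WWr ZZl ZZr).map Prod.snd)).1,
        (pvRemoveExtra (WW ++ (pvNews WWl WWr ZZl ZZr).map Prod.fst) (ZZ ++ (pvNews WWl WWr ZZl ZZr).map Prod.snd)).2,
        ([] : List String), ([] : List String), ([] : List String), ([] : List String)) = _
  rw [pvRemoveExtra_eq _ _ hlen, hzip, hB]

-- ===== VERDICT (by name: the statement is the Claim_ definition above) =====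
theorem UpdateAlignments_spec : Claim_equal_UpdateAlignments := by
  intro WW ZZ WWl WWr ZZl ZZr _ hPre
  exact pvMain WW ZZ WWl WWr ZZl ZZr hPre.1 hPre.2.1 hPre.2.2
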